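-- pv_equiv track=rewrite | github.com/viancu/assorted-functions | contains_i_array.py | contains_i_help
-- ===== SOURCE A (Python) =====
-- def contains_i_help(arr, offset):
--     if len(arr) == 1:
--         if arr[0] == offset:
--             return True
--         else:
--             return False
--     half = len(arr)//2
--     left = arr[:half]
--     left_offset = offset
--     right = arr[half:]
--     right_offset = half + offset
--
--     if left_offset >= left[0]:
--         left_bool = contains_i_help(left, left_offset)
--     else:
--         left_bool = False
--     if right_offset >= right[0]:
--         right_bool = contains_i_help(right, right_offset)
--     else:
--         right_bool = False
--     return left_bool or right_bool
-- ===== SOURCE B (Python) =====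
-- def contains_i_help(arr, offset):
--     # Explicit-stack traversal of the same pruned binary split (return value only; A's
--     # recursion is replaced by a worklist of (lo, hi, offset) index segments).
--     stack = [(0, len(arr), offset)]
--     while stack:
--         lo, hi, off = stack.pop()
--         if hi - lo == 1:
--             if arr[lo] == off:
--                 return True
--         else:
--             half = (hi - lo) // 2
--             mid = lo + half
--             if off >= arr[lo]:
--                 stack.append((lo, mid, off))
--             if half + off >= arr[mid]:
--                 stack.append((mid, hi, half + off))
--     return False
-- ===== Notes on version B (the rewrite author's own statement) =====
-- stated objective: alternative
-- what changed: Replaces the slice-building recursion with an iterative explicit-stack worklist of (lo, hi, offset) index segments over the original array, so no sublists are ever allocated and True is returned as soon as a matching leaf is popped.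
import Mathlib
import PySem

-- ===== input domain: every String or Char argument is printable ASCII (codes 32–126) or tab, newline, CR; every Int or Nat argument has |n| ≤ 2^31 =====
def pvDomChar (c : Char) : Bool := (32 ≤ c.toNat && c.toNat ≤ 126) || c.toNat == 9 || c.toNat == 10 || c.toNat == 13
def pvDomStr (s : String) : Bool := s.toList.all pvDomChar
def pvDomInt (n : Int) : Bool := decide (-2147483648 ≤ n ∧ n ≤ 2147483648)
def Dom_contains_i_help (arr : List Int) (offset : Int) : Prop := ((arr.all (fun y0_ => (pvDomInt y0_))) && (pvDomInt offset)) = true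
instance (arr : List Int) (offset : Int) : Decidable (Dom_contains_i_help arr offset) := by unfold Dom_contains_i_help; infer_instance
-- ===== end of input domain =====

-- B replaces A's slice-building recursion by an iterative explicit-stack worklist of
-- (lo, hi, offset) index segments over the original array; return values are proved equal
-- on every nonempty list (both Pythons raise IndexError on []).

-- ===== PORT A =====
-- Step-for-step port of A's recursion on slices, made total by a fuel parameter: every
-- recursive call is on a strictly shorter list, so fuel = arr.length (the wrapper below)
-- never runs out on the inputs Python returns on. Where Python raises IndexError
-- (len(arr) == 0, excluded by Pre_) the port returns false.
def pvAGo : Nat → List Int → Int → Bool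
  | 0, _, _ => false  -- fuel exhausted: unreachable from the wrapper's fuel
  | fuel + 1, arr, offset =>
    if arr.length = 1 then
      arr.headI == offset
    else if arr.length = 0 then
      false  -- Python: left[0] raises IndexError here (excluded by Pre_)
    else
      let half := arr.length / 2
      let left := arr.take half
      let left_offset := offset
      let right := arr.drop half
      let right_offset := (half : Int) + offset
      let left_bool := if left_offset ≥ left.headI then pvAGo fuel left left_offset else false
      let right_bool := if right_offset ≥ right.headI then pvAGo fuel right right_offset else false
      left_bool || right_bool

def contains_i_help (arr : List Int) (offset : Int) : Bool :=
  pvAGo arr.length arr offset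

-- ===== PORT B =====
-- The while-loop over the explicit stack; the list head is the stack top. Total via a
-- fuel parameter: each iteration pops one segment, and a stack of one in-range segment
-- of length n is fully processed in at most 2n-1 iterations, so the wrapper's fuel
-- 2*arr.length + 1 never runs out on the inputs Python returns on. arr[lo]/arr[mid]
-- are in range on every segment reachable from a nonempty input; the 'hi ≤ lo' skip
-- only makes the degenerate empty segment (Python: IndexError) total.
def pvBGo : Nat → List Int → List (Nat × Nat × Int) → Bool
  | _, _, [] => false
  | 0, _, _ :: _ => false  -- fuel exhausted: unreachable from the wrapper's fuel
  | fuel + 1, arr, (lo, hi, off) :: rest =>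
    if hi - lo = 1 then
      if arr.getD lo 0 == off then true else pvBGo fuel arr rest
    else if hi ≤ lo then
      pvBGo fuel arr rest  -- Python: arr[lo] raises IndexError here (excluded by Pre_)
    else
      let half := (hi - lo) / 2
      let mid := lo + half
      let s1 := if off ≥ arr.getD lo 0 then (lo, mid, off) :: rest else rest
      let s2 := if (half : Int) + off ≥ arr.getD mid 0 then (mid, hi, (half : Int) + off) :: s1 else s1
      pvBGo fuel arr s2

def contains_i_help_alt (arr : List Int) (offset : Int) : Bool :=
  pvBGo (2 * arr.length + 1) arr [(0, arr.length, offset)]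

-- ===== PRECONDITION & SPEC =====
-- Pre_ excludes only the empty list, on which both Pythons raise IndexError (left[0] / arr[0]).
def Pre_contains_i_help (arr : List Int) (offset : Int) : Prop := arr ≠ []
instance (arr : List Int) (offset : Int) : Decidable (Pre_contains_i_help arr offset) := by unfold Pre_contains_i_help; infer_instance
def pvWitness_contains_i_help : List Int × Int := ([3, 1, 2, 3], 0)

def Spec_contains_i_help (arr : List Int) (offset : Int) (out : Bool) : Prop := out = contains_i_help_alt arr offset
instance (arr : List Int) (offset : Int) (out : Bool) : Decidable (Spec_contains_i_help arr offset out) := by unfold Spec_contains_i_help; infer_instance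

-- ===== CLAIM (what is proved, stated in full; the proofs are below) =====
def Claim_equal_contains_i_help : Prop := ∀ (arr : List Int) (offset : Int), Dom_contains_i_help arr offset → Pre_contains_i_help arr offset → Spec_contains_i_help arr offset (contains_i_help arr offset)

-- ===== LEMMAS AND PROOFS =====

lemma pv_headI_take {l : List Int} {k : Nat} (hk : 1 ≤ k) : (l.take k).headI = l.headI := by
  cases l <;> cases k <;> simp_all

lemma pv_headI_drop {l : List Int} {n : Nat} : (l.drop n).headI = l.getD n 0 := by
  rw [List.getD_eq_getElem?_getD, ← List.head?_drop]
  cases l.drop n <;> simp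

lemma pv_AGo_nil (f : Nat) (off : Int) : pvAGo f [] off = false := by
  cases f <;> simp [pvAGo]

-- A's port computes the same value under any sufficient fuel.
lemma pv_AGo_fuel (f : Nat) : ∀ (g : Nat) (arr : List Int) (off : Int),
    arr.length ≤ f → arr.length ≤ g → pvAGo f arr off = pvAGo g arr off := by
  induction f with
  | zero =>
    intro g arr off h1 _
    have : arr = [] := List.length_eq_zero_iff.mp (Nat.le_zero.mp h1)
    subst this; rw [pv_AGo_nil, pv_AGo_nil]
  | succ f ih =>
    intro g arr off h1 h2
    cases g with
    | zero =>
      have : arr = [] := List.length_eq_zero_iff.mp (Nat.le_zero.mp h2)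
      subst this; rw [pv_AGo_nil, pv_AGo_nil]
    | succ g =>
      by_cases hl1 : arr.length = 1
      · simp [pvAGo, hl1]
      by_cases hl0 : arr.length = 0
      · simp [pvAGo, hl1, hl0]
      · simp only [pvAGo, hl1, hl0, if_false]
        rw [ih g (arr.take (arr.length / 2)) off
              (by simp only [List.length_take]; omega) (by simp only [List.length_take]; omega),
            ih g (arr.drop (arr.length / 2)) (((arr.length / 2 : Nat) : Int) + off)
              (by simp only [List.length_drop]; omega) (by simp only [List.length_drop]; omega)]

lemma pv_A_one (seg : List Int) (off : Int) (h : seg.length = 1) :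
    contains_i_help seg off = (seg.headI == off) := by
  unfold contains_i_help
  rw [h]
  simp [pvAGo, h]

lemma pv_A_split (seg : List Int) (off : Int) (h : 2 ≤ seg.length) :
    contains_i_help seg off =
      ((if off ≥ (seg.take (seg.length / 2)).headI
          then contains_i_help (seg.take (seg.length / 2)) off else false)
        || (if ((seg.length / 2 : Nat) : Int) + off ≥ (seg.drop (seg.length / 2)).headI
          then contains_i_help (seg.drop (seg.length / 2)) (((seg.length / 2 : Nat) : Int) + off) else false)) := by
  unfold contains_i_help
  obtain ⟨f, hf⟩ : ∃ f, seg.length = f + 1 := ⟨seg.length - 1, by omega⟩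
  conv_lhs => rw [hf]
  simp only [pvAGo, if_neg (by omega : ¬ seg.length = 1), if_neg (by omega : ¬ seg.length = 0)]
  rw [pv_AGo_fuel f (seg.take (seg.length / 2)).length (seg.take (seg.length / 2)) off
        (by simp only [List.length_take]; omega) le_rfl,
      pv_AGo_fuel f (seg.drop (seg.length / 2)).length (seg.drop (seg.length / 2)) (((seg.length / 2 : Nat) : Int) + off)
        (by simp only [List.length_drop]; omega) le_rfl]

-- What the remaining stack is worth: the OR over its segments of A's answer on each slice.
def pvORR (arr : List Int) : List (Nat × Nat × Int) → Bool
  | [] => false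
  | (lo, hi, off) :: rest => contains_i_help ((arr.drop lo).take (hi - lo)) off || pvORR arr rest

-- Fuel budget of a stack: a segment of length n costs at most 2n-1 iterations.
def pvM (stack : List (Nat × Nat × Int)) : Nat :=
  (stack.map (fun s => 2 * (s.2.1 - s.1) - 1)).sum

-- Loop invariant: with enough fuel, B's loop returns the OR over the stack of A's answers.
lemma pv_BGo_inv (arr : List Int) (f : Nat) : ∀ (stack : List (Nat × Nat × Int)),
    (∀ s ∈ stack, s.1 < s.2.1 ∧ s.2.1 ≤ arr.length) → pvM stack ≤ f →
    pvBGo f arr stack = pvORR arr stack := by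
  induction f with
  | zero =>
    intro stack hok hm
    cases stack with
    | nil => simp [pvBGo, pvORR]
    | cons s rest =>
      exfalso
      have h1 := hok s (List.mem_cons_self)
      simp only [pvM, List.map_cons, List.sum_cons, Prod.fst, Prod.snd] at hm
      omega
  | succ f ih =>
    intro stack hok hm
    cases stack with
    | nil => simp [pvBGo, pvORR]
    | cons s rest =>
      obtain ⟨lo, hi, off⟩ := s
      have hlthle := hok _ (List.mem_cons_self)
      simp only [Prod.fst, Prod.snd] at hlthle
      obtain ⟨hlt, hle⟩ := hlthle
      have hokr : ∀ s ∈ rest, s.1 < s.2.1 ∧ s.2.1 ≤ arr.length :=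
        fun s hs => hok s (List.mem_cons_of_mem _ hs)
      simp only [pvM, List.map_cons, List.sum_cons, Prod.fst, Prod.snd] at hm
      have hmr : pvM rest ≤ f := by simp only [pvM]; omega
      have hlen : ((arr.drop lo).take (hi - lo)).length = hi - lo := by
        simp only [List.length_take, List.length_drop]; omega
      by_cases h1 : hi - lo = 1
      · have hseg : contains_i_help ((arr.drop lo).take (hi - lo)) off = (arr.getD lo 0 == off) := by
          rw [pv_A_one _ _ (hlen.trans h1), pv_headI_take (by omega), pv_headI_drop]
        simp only [pvBGo, if_pos h1, pvORR, hseg, ih rest hokr hmr]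
        cases he : (arr.getD lo 0 == off) <;> simp [he]
      · have h2 : 2 ≤ hi - lo := by omega
        simp only [pvBGo, if_neg h1, if_neg (by omega : ¬ hi ≤ lo)]
        set L := hi - lo with hL
        set half := L / 2 with hhalf
        have hhalf1 : 1 ≤ half := by omega
        have hhalfL : half < L := by omega
        have hleft : ((arr.drop lo).take L).take half = (arr.drop lo).take half := by
          rw [List.take_take]; congr 1; omega
        have hright : ((arr.drop lo).take L).drop half = (arr.drop (lo + half)).take (L - half) := by
          rw [List.drop_take, List.drop_drop]
        have hmid : hi - (lo + half) = L - half := by omega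
        have hsplit : contains_i_help ((arr.drop lo).take L) off =
            ((if off ≥ arr.getD lo 0 then contains_i_help ((arr.drop lo).take half) off else false)
              || (if (half : Int) + off ≥ arr.getD (lo + half) 0
                then contains_i_help ((arr.drop (lo + half)).take (L - half)) ((half : Int) + off) else false)) := by
          rw [pv_A_split _ _ (by omega : 2 ≤ ((arr.drop lo).take L).length)]
          rw [hlen] at *
          rw [hleft, hright, pv_headI_take hhalf1, pv_headI_drop,
              pv_headI_take (by omega), pv_headI_drop, hlen]
        have hok1 : ∀ s ∈ ((lo, lo + half, off) :: rest), s.1 < s.2.1 ∧ s.2.1 ≤ arr.length := by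
          intro s hs
          rcases List.mem_cons.mp hs with h | h
          · subst h; refine ⟨?_, ?_⟩ <;> simp only [Prod.fst, Prod.snd] <;> omega
          · exact hokr s h
        have hok2 : ∀ s ∈ ((lo + half, hi, (half : Int) + off) :: rest), s.1 < s.2.1 ∧ s.2.1 ≤ arr.length := by
          intro s hs
          rcases List.mem_cons.mp hs with h | h
          · subst h; refine ⟨?_, ?_⟩ <;> simp only [Prod.fst, Prod.snd] <;> omega
          · exact hokr s h
        have hok3 : ∀ s ∈ ((lo + half, hi, (half : Int) + off) :: (lo, lo + half, off) :: rest),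
            s.1 < s.2.1 ∧ s.2.1 ≤ arr.length := by
          intro s hs
          rcases List.mem_cons.mp hs with h | h
          · subst h; refine ⟨?_, ?_⟩ <;> simp only [Prod.fst, Prod.snd] <;> omega
          · exact hok1 s h
        by_cases cl : off ≥ arr.getD lo 0 <;> by_cases cr : (half : Int) + off ≥ arr.getD (lo + half) 0
        · rw [if_pos cl, if_pos cr,
            ih _ hok3 (by simp only [pvM, List.map_cons, List.sum_cons, Prod.fst, Prod.snd]; omega)]
          simp only [pvORR, ← hL, hmid, hsplit, if_pos cl, if_pos cr, ih rest hokr hmr]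
          simp [Bool.or_assoc, Bool.or_comm, Bool.or_left_comm]
        · rw [if_pos cl, if_neg cr,
            ih _ hok1 (by simp only [pvM, List.map_cons, List.sum_cons, Prod.fst, Prod.snd]; omega)]
          simp only [pvORR, ← hL, hsplit, if_pos cl, if_neg cr, ih rest hokr hmr]
          simp [Bool.or_assoc, Bool.or_comm, Bool.or_left_comm]
        · rw [if_neg cl, if_pos cr,
            ih _ hok2 (by simp only [pvM, List.map_cons, List.sum_cons, Prod.fst, Prod.snd]; omega)]
          simp only [pvORR, ← hL, hmid, hsplit, if_neg cl, if_pos cr, ih rest hokr hmr]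
          simp [Bool.or_assoc, Bool.or_comm, Bool.or_left_comm]
        · rw [if_neg cl, if_neg cr, ih rest hokr hmr]
          simp only [pvORR, ← hL, hsplit, if_neg cl, if_neg cr]
          simp

lemma pv_main (arr : List Int) (offset : Int) (h : arr ≠ []) :
    contains_i_help arr offset = contains_i_help_alt arr offset := by
  have hlen : 0 < arr.length := List.length_pos_iff.mpr h
  unfold contains_i_help_alt
  rw [pv_BGo_inv arr (2 * arr.length + 1) [(0, arr.length, offset)]
        (by intro s hs; simp only [List.mem_singleton] at hs; subst hs; exact ⟨hlen, le_rfl⟩)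
        (by simp only [pvM, List.map_cons, List.sum_cons, List.map_nil, List.sum_nil]; omega)]
  simp [pvORR]

-- ===== VERDICT (by name: the statement is the Claim_ definition above) =====
theorem contains_i_help_spec : Claim_equal_contains_i_help := by
  intro arr offset _ hpre
  unfold Spec_contains_i_help
  exact pv_main arr offset hpre
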